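-- pv_equiv track=rewrite | github.com/Anshuman9610/final-sih | crew_pipeline.py | truncate_passages
-- ===== SOURCE A (Python) =====
-- def truncate_passages(passages, max_total_tokens=3000):
--     total_tokens = 0
--     truncated = []
--     for p in passages:
--         tokens = len(p.split())
--         if total_tokens + tokens > max_total_tokens:
--             break
--         truncated.append(p)
--         total_tokens += tokens
--     return truncated
-- ===== SOURCE B (Python) =====
-- from bisect import bisect_right
-- from itertools import accumulate
--
-- def truncate_passages(passages, max_total_tokens=3000):
--     totals = list(accumulate(len(p.split()) for p in passages))
--     return passages[:bisect_right(totals, max_total_tokens)]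
-- ===== Notes on version B (the rewrite author's own statement) =====
-- stated objective: alternative
-- what changed: Instead of scanning with a running total and breaking, B builds the list of cumulative token counts and finds the cutoff index by binary search (bisect_right, correct because cumulative counts are nondecreasing), then returns the slice up to that index.
import Mathlib
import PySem

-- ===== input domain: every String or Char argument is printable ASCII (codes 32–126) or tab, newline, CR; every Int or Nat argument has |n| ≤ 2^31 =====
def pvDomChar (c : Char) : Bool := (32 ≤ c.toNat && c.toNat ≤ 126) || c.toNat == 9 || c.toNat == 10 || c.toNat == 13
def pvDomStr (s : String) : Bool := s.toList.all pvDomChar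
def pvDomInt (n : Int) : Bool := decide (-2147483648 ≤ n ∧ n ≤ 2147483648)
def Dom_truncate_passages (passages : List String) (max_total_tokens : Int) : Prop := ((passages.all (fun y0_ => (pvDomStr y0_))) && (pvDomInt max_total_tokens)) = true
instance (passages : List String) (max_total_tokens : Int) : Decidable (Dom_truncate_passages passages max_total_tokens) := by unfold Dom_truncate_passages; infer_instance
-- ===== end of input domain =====

-- B replaces A's running-total scan with break by prefix sums + a bisect_right binary search for the cutoff, then a slice (alternative algorithm; same cost).


-- ===== PORT A =====
-- the for-loop with break, carrying total_tokens as the accumulator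
def truncAuxA (max_total_tokens : Int) (ps : List String) (total_tokens : Int) : List String :=
  match ps with
  | [] => []
  | p :: rest =>
    let tokens : Int := (PySem.Str.split₀ p).length
    if total_tokens + tokens > max_total_tokens then []
    else p :: truncAuxA max_total_tokens rest (total_tokens + tokens)

def truncate_passages (passages : List String) (max_total_tokens : Int) : List String :=
  truncAuxA max_total_tokens passages 0

-- ===== PORT B =====
-- itertools.accumulate = tail of scanl (+) 0; bisect_right finds the cutoff; passages[:k] with k ≥ 0 is List.take k (exact)
def truncate_passages_alt (passages : List String) (max_total_tokens : Int) : List String :=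
  let totals : List Int := ((passages.map (fun p => ((PySem.Str.split₀ p).length : Int))).scanl (· + ·) 0).tail
  passages.take (PySem.List.bisectRight totals max_total_tokens)

-- ===== PRECONDITION & SPEC =====
def Spec_truncate_passages (passages : List String) (max_total_tokens : Int) (out : List String) : Prop := out = truncate_passages_alt passages max_total_tokens
instance (passages : List String) (max_total_tokens : Int) (out : List String) : Decidable (Spec_truncate_passages passages max_total_tokens out) := by unfold Spec_truncate_passages; infer_instance

-- ===== CLAIM (what is proved, stated in full; the proofs are below) =====
def Claim_equal_truncate_passages : Prop := ∀ (passages : List String) (max_total_tokens : Int), Dom_truncate_passages passages max_total_tokens → Spec_truncate_passages passages max_total_tokens (truncate_passages passages max_total_tokens)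

-- ===== LEMMAS AND PROOFS =====

-- every element of a scanl of nonnegative increments is ≥ the seed
theorem le_of_mem_scanl (cs : List Int) (s : Int) (hn : ∀ c ∈ cs, 0 ≤ c) :
    ∀ y ∈ cs.scanl (· + ·) s, s ≤ y := by
  induction cs generalizing s with
  | nil => intro y hy; simp at hy; omega
  | cons c cs ih =>
    intro y hy
    rw [List.scanl_cons] at hy
    rcases List.mem_cons.mp hy with h | h
    · omega
    · have h1 : s + c ≤ y := ih (s + c) (fun d hd => hn d (List.mem_cons_of_mem _ hd)) y h
      have h2 : 0 ≤ c := hn c (List.mem_cons_self)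
      omega

-- a scanl of nonnegative increments is nondecreasing
theorem scanl_pairwise (cs : List Int) (s : Int) (hn : ∀ c ∈ cs, 0 ≤ c) :
    List.Pairwise (· ≤ ·) (cs.scanl (· + ·) s) := by
  induction cs generalizing s with
  | nil => simp
  | cons c cs ih =>
    rw [List.scanl_cons]
    refine List.pairwise_cons.mpr ⟨?_, ih (s + c) (fun d hd => hn d (List.mem_cons_of_mem _ hd))⟩
    intro y hy
    have h1 : s + c ≤ y := le_of_mem_scanl cs (s + c) (fun d hd => hn d (List.mem_cons_of_mem _ hd)) y hy
    have h2 : 0 ≤ c := hn c (List.mem_cons_self)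
    omega

-- inside the takeWhile prefix the predicate holds
theorem takeWhile_getElem_true (a : List Int) (p : Int → Bool) :
    ∀ (j : Nat) (hj : j < a.length), j < (a.takeWhile p).length → p a[j] = true := by
  induction a with
  | nil => intro j hj; simp at hj
  | cons x t ih =>
    intro j hj hlt
    by_cases hp : p x = true
    · cases j with
      | zero => simpa using hp
      | succ j =>
        simp only [List.takeWhile_cons, hp, if_true, List.length_cons] at hlt
        simpa using ih j (by simpa using hj) (by omega)
    · have hp' : p x = false := by simpa using hp
      simp [hp'] at hlt

-- at the boundary index the predicate fails
theorem takeWhile_boundary_false (a : List Int) (p : Int → Bool) :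
    ∀ (h : (a.takeWhile p).length < a.length), p (a[(a.takeWhile p).length]) = false := by
  induction a with
  | nil => intro h; simp at h
  | cons x t ih =>
    intro h
    by_cases hp : p x = true
    · simp only [List.takeWhile_cons, hp, if_true, List.length_cons] at h ⊢
      simpa using ih (by omega)
    · have hp' : p x = false := by simpa using hp
      simp [hp']

-- bisect_right on a nondecreasing list is the length of the ≤-prefix
theorem bisectRight_eq_takeWhile_length (a : List Int) (m : Int)
    (hs : List.Pairwise (· ≤ ·) a) :
    PySem.List.bisectRight a m = (a.takeWhile (fun s => decide (s ≤ m))).length := by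
  obtain ⟨hle, hin, hout⟩ := PySem.List.bisectRight_spec a m hs
  set k := PySem.List.bisectRight a m with hk
  set tw := (a.takeWhile (fun s => decide (s ≤ m))).length with htw
  have htwle : tw ≤ a.length := (List.takeWhile_sublist (fun s => decide (s ≤ m))).length_le
  rcases lt_trichotomy k tw with h | h | h
  · exfalso
    have hklen : k < a.length := lt_of_lt_of_le h htwle
    have h1 : decide (a[k] ≤ m) = true := takeWhile_getElem_true a _ k hklen h
    have h2 : m < a[k] := hout k hklen (le_refl k)
    simp at h1; omega
  · exact h
  · exfalso
    have htwlen : tw < a.length := lt_of_lt_of_le h hle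
    have h1 : decide (a[tw] ≤ m) = false := takeWhile_boundary_false a _ htwlen
    have h2 : a[tw] ≤ m := hin tw htwlen h
    simp at h1; omega

-- A's loop is the take of the ≤-prefix of the running totals
theorem truncAux_eq_take (m : Int) (ps : List String) (t : Int) :
    truncAuxA m ps t =
      ps.take ((((ps.map (fun p => ((PySem.Str.split₀ p).length : Int))).scanl (· + ·) t).tail).takeWhile
        (fun s => decide (s ≤ m))).length := by
  induction ps generalizing t with
  | nil => simp [truncAuxA]
  | cons p rest ih =>
    have hd : ∀ (s : Int) (cs : List Int), (cs.scanl (· + ·) s) = s :: (cs.scanl (· + ·) s).tail := by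
      intro s cs; cases cs <;> simp
    rw [truncAuxA]
    simp only [List.map_cons, List.scanl_cons, List.tail_cons]
    rw [hd (t + ((PySem.Str.split₀ p).length : Int))]
    simp only [List.takeWhile_cons]
    by_cases h : t + ((PySem.Str.split₀ p).length : Int) ≤ m
    · simp only [h, decide_true, if_true, if_neg (not_lt.mpr h), List.length_cons, List.take_succ_cons]
      rw [ih]
    · simp [h, if_pos (lt_of_not_ge h)]

-- ===== VERDICT (by name: the statement is the Claim_ definition above) =====
theorem truncate_passages_spec : Claim_equal_truncate_passages := by
  intro passages m _
  show _ = _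
  unfold truncate_passages truncate_passages_alt
  have hn : ∀ c ∈ passages.map (fun p => ((PySem.Str.split₀ p).length : Int)), 0 ≤ c := by
    intro c hc
    obtain ⟨p, _, rfl⟩ := List.mem_map.mp hc
    exact Int.natCast_nonneg _
  have hs : List.Pairwise (· ≤ ·)
      (((passages.map (fun p => ((PySem.Str.split₀ p).length : Int))).scanl (· + ·) 0).tail) :=
    List.Pairwise.sublist (List.tail_sublist _) (scanl_pairwise _ 0 hn)
  rw [truncAux_eq_take m passages 0]
  show _ = List.take (PySem.List.bisectRight (((passages.map (fun p => ((PySem.Str.split₀ p).length : Int))).scanl (· + ·) 0).tail) m) passages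
  rw [bisectRight_eq_takeWhile_length _ m hs]
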